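-- pv_equiv track=rewrite | github.com/HaymayndzUltra/secretflow | scripts/select_stacks.py | _extract_paragraph
-- ===== SOURCE A (Python) =====
-- from typing import Dict, List, Optional, Tuple
--
-- def _extract_paragraph(text: str) -> str:
--     lines = text.splitlines()
--     paragraph: List[str] = []
--     for line in lines:
--         stripped = line.strip()
--         if not stripped:
--             if paragraph:
--                 break
--             continue
--         if stripped.startswith("#"):
--             # Skip headings at the top of the file
--             if not paragraph:
--                 continue
--             break
--         if stripped.startswith("-") and not paragraph:
--             # Avoid leading bullet lists being treated as summary
--             continue
--         if stripped.startswith("##"):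
--             break
--         paragraph.append(stripped)
--     return " ".join(paragraph).strip()
-- ===== SOURCE B (Python) =====
-- def _extract_paragraph(text: str) -> str:
--     lines = text.splitlines()
--     # Pass 1: skip leading lines that are blank, headings, or bullets.
--     i = 0
--     while i < len(lines):
--         s = lines[i].strip()
--         if s and not s.startswith("#") and not s.startswith("-"):
--             break
--         i += 1
--     # Pass 2: collect stripped lines until a blank line or a heading.
--     paragraph = []
--     while i < len(lines):
--         s = lines[i].strip()
--         if not s or s.startswith("#"):
--             break
--         paragraph.append(s)
--         i += 1
--     return " ".join(paragraph).strip()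
-- ===== Notes on version B (the rewrite author's own statement) =====
-- stated objective: simpler
-- what changed: Replaces the single loop with paragraph-emptiness-dependent skip/break branches (and an unreachable '##' branch) by two sequential passes: one that skips leading blank/heading/bullet lines, one that collects until a blank line or heading.
import Mathlib
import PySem

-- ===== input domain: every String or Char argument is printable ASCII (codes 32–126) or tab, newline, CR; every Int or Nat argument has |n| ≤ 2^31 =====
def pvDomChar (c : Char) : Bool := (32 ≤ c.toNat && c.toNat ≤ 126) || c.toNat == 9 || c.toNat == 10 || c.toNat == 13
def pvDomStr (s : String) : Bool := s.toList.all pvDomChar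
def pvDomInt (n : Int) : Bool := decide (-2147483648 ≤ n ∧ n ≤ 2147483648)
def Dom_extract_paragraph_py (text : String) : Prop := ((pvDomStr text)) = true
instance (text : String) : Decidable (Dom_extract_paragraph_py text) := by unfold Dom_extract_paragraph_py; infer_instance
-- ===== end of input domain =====

-- B replaces A's single loop with break/skip branches keyed on paragraph-emptiness by two
-- sequential passes (skip leading blank/heading/bullet lines, then collect until blank/heading);
-- objective: simpler.


-- ===== PORT A =====
-- A's loop over the lines carrying the accumulated paragraph; returning the state models `break`.
def pvALoop (ls : List String) (paragraph : List String) : List String :=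
  match ls with
  | [] => paragraph
  | line :: rest =>
    let stripped := PySem.Str.strip line
    if stripped = "" then
      if paragraph ≠ [] then paragraph else pvALoop rest paragraph
    else if PySem.Str.startswith stripped "#" then
      if paragraph = [] then pvALoop rest paragraph else paragraph
    else if PySem.Str.startswith stripped "-" ∧ paragraph = [] then
      pvALoop rest paragraph
    else if PySem.Str.startswith stripped "##" then paragraph
    else pvALoop rest (paragraph ++ [stripped])

def extract_paragraph_py (text : String) : String :=
  PySem.Str.strip (PySem.Str.join " " (pvALoop (PySem.Str.splitlines text) []))

-- ===== PORT B =====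
-- Pass 1 of Source B: skip leading lines that are blank, headings, or bullets.
def pvSkipLead (ls : List String) : List String :=
  match ls with
  | [] => []
  | line :: rest =>
    let s := PySem.Str.strip line
    if s ≠ "" ∧ ¬ PySem.Str.startswith s "#" ∧ ¬ PySem.Str.startswith s "-" then line :: rest
    else pvSkipLead rest

-- Pass 2 of Source B: collect stripped lines until a blank line or a heading.
def pvCollect (ls : List String) : List String :=
  match ls with
  | [] => []
  | line :: rest =>
    let s := PySem.Str.strip line
    if s = "" ∨ PySem.Str.startswith s "#" then []
    else s :: pvCollect rest

def extract_paragraph_py_alt (text : String) : String :=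
  PySem.Str.strip (PySem.Str.join " " (pvCollect (pvSkipLead (PySem.Str.splitlines text))))

-- ===== PRECONDITION & SPEC =====
def Spec_extract_paragraph_py (text : String) (out : String) : Prop := out = extract_paragraph_py_alt text
instance (text : String) (out : String) : Decidable (Spec_extract_paragraph_py text out) := by unfold Spec_extract_paragraph_py; infer_instance

-- ===== CLAIM (what is proved, stated in full; the proofs are below) =====
def Claim_equal_extract_paragraph_py : Prop := ∀ (text : String), Dom_extract_paragraph_py text → Spec_extract_paragraph_py text (extract_paragraph_py text)

-- ===== LEMMAS AND PROOFS =====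

-- if "#" is not a prefix then neither is "##"
theorem pv_no_double_hash (cs : List Char) (h : PySem.Chars.startswith cs ['#'] = false) :
    PySem.Chars.startswith cs ['#', '#'] = false := by
  rw [← Bool.not_eq_true] at h ⊢
  rw [PySem.Chars.startswith_iff] at h ⊢
  intro hp
  exact h (List.IsPrefix.trans ⟨['#'], rfl⟩ hp)

-- once the paragraph is nonempty, A's loop appends exactly what pvCollect yields
theorem pvALoop_nonempty (ls : List String) (p : List String) (hp : p ≠ []) :
    pvALoop ls p = p ++ pvCollect ls := by
  induction ls generalizing p with
  | nil => simp [pvALoop, pvCollect]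
  | cons line rest ih =>
    by_cases h0 : PySem.Str.strip line = ""
    · simp [pvALoop, pvCollect, h0, hp]
    · by_cases h1 : PySem.Chars.startswith (PySem.Chars.strip line.toList) ['#'] = true
      · simp [pvALoop, pvCollect, h0, h1, hp]
      · have h1' := Bool.not_eq_true _ |>.mp h1
        have h3 := pv_no_double_hash _ h1'
        simp [pvALoop, pvCollect, h0, h1', h3, hp,
          ih (p ++ [PySem.Str.strip line]) (by simp)]

-- with an empty paragraph, A's loop computes B's two passes
theorem pvALoop_nil (ls : List String) :
    pvALoop ls [] = pvCollect (pvSkipLead ls) := by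
  induction ls with
  | nil => simp [pvALoop, pvSkipLead, pvCollect]
  | cons line rest ih =>
    by_cases h0 : PySem.Str.strip line = ""
    · simp [pvALoop, pvSkipLead, h0, ih]
    · by_cases h1 : PySem.Chars.startswith (PySem.Chars.strip line.toList) ['#'] = true
      · simp [pvALoop, pvSkipLead, h0, h1, ih]
      · have h1' := Bool.not_eq_true _ |>.mp h1
        by_cases h2 : PySem.Chars.startswith (PySem.Chars.strip line.toList) ['-'] = true
        · simp [pvALoop, pvSkipLead, h0, h1', h2, ih]
        · have h2' := Bool.not_eq_true _ |>.mp h2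
          have h3 := pv_no_double_hash _ h1'
          simp [pvALoop, pvSkipLead, pvCollect, h0, h1', h2', h3,
            pvALoop_nonempty rest [PySem.Str.strip line] (by simp)]

-- ===== VERDICT (by name: the statement is the Claim_ definition above) =====
theorem extract_paragraph_py_spec : Claim_equal_extract_paragraph_py := by
  intro text _
  unfold Spec_extract_paragraph_py extract_paragraph_py extract_paragraph_py_alt
  rw [pvALoop_nil]
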